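/-
  LIVE RANGES AND THE HEAP'S PRECONDITION, FOR A CLIENT OF THE HEAP (program-independent, for any text record `T`; first written in the
  trees of giflib and lodepng). The instances at the base image's text record — the names the programs on the base image cite,
  `ProgX.Base.LiveIn.push_frame` … — are in ProgX/Base/Spec/Lemmas.lean; the facts about `Heap`, `HeapOK`, `HeapInv`, `ShadowInv`
  alone in Asan/HeapLemmas.lean.

  §1  LIVE RANGES UNDER ANOTHER FRAME LIST, ANOTHER HEAP
      LiveIn.push h bF               a live range stays live under one more active frame (`LiveIn.push_frame`: the same, giflib's name)
      LiveIn.of_nil h                a range inside ONE object of `others` (no stack object) is live under every list of frames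
      LiveIn.rest_heap h H frames    a range inside ONE object of `rest` is live in every heap and under every list of frames
                                     (`LiveIn.of_rest`: the same, giflib's name)
      LiveIn.own others ho h1 h2     a range inside an object of the own protected frame is live in the list with the own frame in front
  §2  WHERE A LIVE RANGE IS
      LiveIn.rest_offStack h hinv    a range inside an object of `rest` does not meet the stack region `[700000H, 800000H)`
      LiveIn.rest_where hinv hb hl h hn    … lies in the data space below the stack region: `100000H ≤ a ∧ a + n ≤ 700000H`
      LiveIn.below_next h hinv       a range live at the heap `H` ends at or below `H.next` or lies beyond the region: it meets NO object
                                     allocated later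
      LiveIn.apart_next h hinv hfit  … so it does not overlap the object `malloc` hands out next: `a + k ≤ H.next ∨ H.next + c ≤ a`
  §3  THE HEAP'S PRECONDITION
      HeapPre.next_range hp          `0x800040 ≤ H.next ∧ H.next ≤ 0xC00020` from a function's `HeapPre`
      HeapPre.at_push_of             `HeapPre` at a callee's entry from a SEGMENT's facts: the present heap's `HeapInv` at the present stack
                                     pointer, the present heap at the place of the entry's (`hb`, `hl`), the `call`'s push: ONE store
      HeapPre.callee_frames_of       the general form: the caller wrote only windows that end at or below 800000H since a state with
                                     `HeapInv` of the present heap — any frame list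
      HeapPre.callee_window_of       the same for ONE window `[lo, hi)`
      (a program states "at the place of" by its own `SameRegion`: its `HeapPre.at_push / callee_frames / callee_window` are corollaries)
  No `sorry`, no axiom, no `bv_decide`, no `native_decide`.
-/
import ProgX.Spec.Heap
import ProgX.Spec.Common
import Asan.HeapLemmas
namespace ProgX
open X86 X86.User Asan

/-! ### §1 Live ranges under another frame list, another heap -/

/-- **A live range of the precondition is live under one more active frame** (the own frame of a protected function, pushed in
front): every protected function that hands a caller's buffer to a callee needs it for the callee's precondition, which is stated
with the body's frame list (`hlive.push _` against `LiveIn others (framesIn frames e) a n`; Adam7_deinterlace, postProcessScanlines,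
removePaddingBits, lodepng_convert, getPixelColorsRGBA8). The `InFrame` form: `InFrame.push` (Common.lean §2). -/
theorem LiveIn.push {others : List Obj} {frames : List (Nat × FrameLayout)} {a n : Nat}
    (h : LiveIn others frames a n) (bF : Nat × FrameLayout) : LiveIn others (bF :: frames) a n := by
  obtain ⟨base, Fl⟩ := bF
  apply h.mono
  intro o ho
  rw [stackObjs_cons]
  rcases List.mem_append.mp ho with hs | hoth
  · exact List.mem_append_left _ (List.mem_append_right _ hs)
  · exact List.mem_append_right _ hoth

/-- **A live range stays live under one more active frame** (the callee's list of frames is the caller's with its own in front):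
`LiveIn.push` under the name giflib's proofs cite. -/
theorem LiveIn.push_frame {others : List Obj} {frames : List (Nat × FrameLayout)} {a n : Nat}
    (h : LiveIn others frames a n) (bF : Nat × FrameLayout) : LiveIn others (bF :: frames) a n :=
  h.push bF

/-- **A chunk's data is live under every list of frames**: the range lies inside ONE object of `others` (the contract says
`LiveIn others [] data chunkLength`: no stack object). What a shadow-level reader's check goal on `data[k]` asks:
`(hdata.of_nil).accSmall hsh.inv hun _ 1 …`. (`LiveIn.push`, FrameCarry.lean §5, adds ONE frame; this is any number of them.) -/
theorem LiveIn.of_nil {others : List Obj} {frames : List (Nat × FrameLayout)} {a n : Nat}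
    (h : LiveIn others [] a n) : LiveIn others frames a n := by
  apply h.mono
  intro o ho
  rw [stackObjs] at ho
  simp only [List.flatMap_nil, List.nil_append] at ho
  exact List.mem_append_right _ ho

/-- **A chunk's data is live in every heap and under every list of frames**: the range lies inside ONE object of `rest` (the input),
which is neither a heap object nor a stack object. What a heap-level reader's check goal on `data[k]` asks, for the PRESENT heap and
the body's frame list (`(hdata.rest_heap Hc frames).accSmall hbody.inv.shadow hun _ 1 …`), and what a callee's `LiveIn` / `SrcIn` clause
asks. (`LiveIn.mono_others` is NOT this lemma: here the frame list changes too.) -/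
theorem LiveIn.rest_heap {rest : List Obj} {a n : Nat} (h : LiveIn rest [] a n) (H : Heap)
    (frames : List (Nat × FrameLayout)) : LiveIn (H.liveObjs ++ rest) frames a n := by
  apply h.mono
  intro o ho
  rw [stackObjs] at ho
  simp only [List.flatMap_nil, List.nil_append] at ho
  exact List.mem_append_right _ (List.mem_append_right _ ho)

/-- **A range inside an object of `rest` is live under every heap and every list of frames**: `LiveIn.rest_heap` under the name
giflib's proofs cite. The driver's precondition states its input and its output as `LiveIn rest [] a n` (no heap, no frame); a callee
asks for `LiveIn (H'.liveObjs ++ rest) frames' a n` with the heap and the frames of the moment: `hl.of_rest H' _`. -/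
theorem LiveIn.of_rest {rest : List Obj} {a n : Nat} (h : LiveIn rest [] a n) (H : Heap)
    (frames : List (Nat × FrameLayout)) : LiveIn (H.liveObjs ++ rest) frames a n :=
  h.rest_heap H frames

/-- **A range inside an object of the own protected frame is live** in the frame list with the own frame in front: what a check
goal on a local asks (`(LiveIn.own _ ho h1 h2).accSmall hbody.inv hun …`). `ho` names the object by its NUMBERS:
`have ho : (⟨RA − 88 + 32, 8, .stack⟩ : Obj) ∈ Png.Frames.lodepng_gtofl.objsAt (RA − 88) := List.mem_cons_self`. -/
theorem LiveIn.own (others : List Obj) {frames : List (Nat × FrameLayout)} {base : Nat} {Fl : FrameLayout}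
    {a n : Nat} (ho : (⟨a, n, .stack⟩ : Obj) ∈ Fl.objsAt base) {b k : Nat} (h1 : a ≤ b) (h2 : b + k ≤ a + n) :
    LiveIn others ((base, Fl) :: frames) b k := by
  refine ⟨⟨a, n, .stack⟩, ?_, h1, h2⟩
  rw [stackObjs_cons]
  apply List.mem_append_left
  apply List.mem_append_left
  exact ho

/-! ### §2 Where a live range is -/

/-- **A range inside an object of `rest` does not meet the stack region** `[700000H, 800000H)`: every object of `rest` is off the
stack (`ShadowInv.off`). What `memcpy` from / to a local asks about an overlap, and what keeps a callee's window `[a, a + n)` away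
from the saved registers. The result is a disjunction: leave it in the context, `u_omega`, `u_same`, `u_frame` split it. -/
theorem LiveIn.rest_offStack {H : Heap} {rest : List Obj} {frames : List (Nat × FrameLayout)} {top : Nat}
    {mem : Mem} {a n : Nat} (h : LiveIn rest [] a n) (hinv : HeapInv H rest frames top mem) :
    a + n ≤ 0x700000 ∨ 0x800000 ≤ a := by
  obtain ⟨o, ho, k1, k2⟩ := h
  have ho' : o ∈ rest := by
    rcases List.mem_append.mp ho with hs | hr
    · exact absurd hs List.not_mem_nil
    · exact hr
  have hoff := hinv.shadow.off o (List.mem_append_right _ ho')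
  unfold OffStack at hoff
  omega

/-- **Where a chunk's data lies**: a non-empty range inside ONE object of `rest` lies in the data space below the stack region (the
object is off the stack, outside the heap's region, and covered by the shadow's data space): `chunkLength < 2^24`, so no 32-bit
counter of a reader wraps, the walker resolves every load of `data[k]` through the stack stores, and no window of the decoder meets
the data. The same statement as `decodeGeneric.input_where` (DecodeCarry.lean §1), without the import of Seg_decodeGeneric. -/
theorem LiveIn.rest_where {H : Heap} {rest : List Obj} {frames : List (Nat × FrameLayout)} {top : Nat}
    {mem : Mem} {a n : Nat} (hinv : HeapInv H rest frames top mem) (hb : H.base = 0x800000) (hl : H.limit = 0xC00000)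
    (h : LiveIn rest [] a n) (hn : 0 < n) : 0x100000 ≤ a ∧ a + n ≤ 0x700000 := by
  obtain ⟨o, hmem, k1, k2⟩ := h
  rw [stackObjs] at hmem
  simp only [List.flatMap_nil, List.nil_append] at hmem
  have hsize : 0 < o.size := by omega
  have hin : o ∈ stackObjs frames ++ (H.liveObjs ++ rest) :=
    List.mem_append_right _ (List.mem_append_right _ hmem)
  have hdata := hinv.shadow.shadow.inside hin hsize
  have hoff : OffStack o := hinv.shadow.off o (List.mem_append_right _ hmem)
  have hout := hinv.restOut o hmem
  unfold OffStack at hoff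
  omega

/-- **A live range of the heap `H` ends at or below the next object, or lies beyond the heap's region**: it lies in a live heap
object (below the next one: `HeapOK.next_above`), in one of the other live objects, or in a stack object (both outside the region:
`HeapInv.restOut`, `HeapInv.stackObj_out`). So it does not meet ANY object allocated later. -/
theorem LiveIn.below_next {H : Heap} {rest : List Obj} {frames : List (Nat × FrameLayout)} {top : Nat} {mem : Mem} {a k : Nat}
    (h : LiveIn (H.liveObjs ++ rest) frames a k) (hinv : HeapInv H rest frames top mem) :
    a + k ≤ H.next ∨ H.limit ≤ a := by
  have hroom := hinv.heap.room
  obtain ⟨o, ho, k1, k2⟩ := h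
  rcases List.mem_append.mp ho with hs | hoth
  · -- a stack object
    rcases hinv.stackObj_out hs with hlo | hhi
    · left
      rw [Heap.next_def]
      omega
    · right
      omega
  · rcases List.mem_append.mp hoth with hheap | hr
    · -- a live heap object
      obtain ⟨o', ho', _, e⟩ := Heap.mem_liveObjs.mp hheap
      have hab := hinv.heap.next_above ho'
      have hsc := hinv.heap.size_le_cap ho'
      have e1 : o.base = o'.base := by
        rw [← e]
        rfl
      have e2 : o.size = o'.size := by
        rw [← e]
        rfl
      left
      omega
    · -- one of the other live objects
      rcases hinv.restOut o hr with hlo | hhi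
      · left
        rw [Heap.next_def]
        omega
      · right
        omega

/-- **A live range of the heap `H` does not overlap the object `malloc` hands out next** (`c` = its capacity, `H.Fits c`): what
`memcpy(p, src, n)` into the new object asks about an overlap. -/
theorem LiveIn.apart_next {H : Heap} {rest : List Obj} {frames : List (Nat × FrameLayout)} {top : Nat} {mem : Mem} {a k c : Nat}
    (h : LiveIn (H.liveObjs ++ rest) frames a k) (hinv : HeapInv H rest frames top mem) (hfit : H.Fits c) :
    a + k ≤ H.next ∨ H.next + c ≤ a := by
  have hle := hfit.next_le
  rcases h.below_next hinv with hlo | hhi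
  · exact Or.inl hlo
  · right
    omega

end ProgX

namespace ProgX.Spec
open X86 X86.User Asan

/-! ### §3 The heap's precondition -/
namespace HeapPre
variable {T : Text} {H : Heap} {rest : List Obj} {frames : List (Nat × FrameLayout)}

/-- **Where the next object lies, from a function's `HeapPre`**: inside the heap's region `[800000H, C00000H)` with its left red
zone. -/
theorem next_range {u : State} (hp : HeapPre T H rest frames u) : 0x800040 ≤ H.next ∧ H.next ≤ 0xC00020 :=
  hp.inv.heap.next_where hp.base hp.limit

/-- **The heap's precondition at a callee's entry, inside a segment** (the `pre_<addr>` goal of a call of `free`, `malloc`, … from a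
segment that is not the function's first, or after an earlier callee changed the heap): the segment has the invariant of the PRESENT
heap `Hc` at its present stack pointer `top` (`hinv`: an assertion's `inv`, or the post of the previous callee), `Hc` is at the place
of the entry's heap (`hb`, `hl`: the two clauses of a program's `SameRegion`), the function's own precondition `hp` gives the text
clauses; the `call` pushed the return address into the 8 bytes below `top` (`hrsp`, `hmem`: the walker's `w_rsp`, `w_mem`; `ha`:
`by u_omega`). A program's `HeapPre.at_push` is this lemma with its own `SameRegion` at the place of `hb`, `hl`. -/
theorem at_push_of {Hc : Heap} {e s : State} {mem : Mem} {top : Nat} {a : Word} {x : Nat}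
    (hp : HeapPre T H rest frames e) (hb : Hc.base = H.base) (hl : Hc.limit = H.limit) (hinv : HeapInv Hc rest frames top mem)
    (hrsp : s.reg .rsp = a) (hmem : s.mem = mem.writeLE a 8 x) (ha : a.toNat + 8 = top) : HeapPre T Hc rest frames s := by
  have hbase : Hc.base = 0x800000 := hb.trans hp.base
  have hlimit : Hc.limit = 0xC00000 := hl.trans hp.limit
  have htop := hinv.shadow.stack.hi
  have hstore : HeapInv Hc rest frames top (mem.writeLE a 8 x) := by
    apply hinv.writeLE_out a 8 x
    · omega
    · left
      rw [hbase]
      omega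
    · left
      omega
  have e_top : (s.reg .rsp).toNat + 8 = top := by
    rw [hrsp]
    exact ha
  refine ⟨?_, hbase, hlimit, hp.text, hp.offText⟩
  rw [e_top, hmem]
  exact hstore

/-- **`HeapPre` AT THE ENTRY OF A CALLEE, GENERAL FORM.** `hpre` is the ENTRY's `HeapPre` (for the static clauses: base, limit,
text), for the entry's heap `H` and the callers' frames; `hinv` the invariant of the PRESENT heap `Hc` (at the place of `H`: `hb`,
`hl`) for ANY frame list `frames'` (a protected function: the list with its own frame in front, `Body.inv`) at a memory `mem`; the
callee's entry state `s` differs from `mem` by stores in windows that end at or below 800000H — the pushed return address, spills,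
AND stores into objects of the own frame, which lie ABOVE the body's stack pointer: `hs` by `rw [w_mem]; u_same`.
`ShadowUntouched` follows from `hs`: no `v_untouched`. The three last hypotheses: `rw [w_rsp]; u_omega` each. -/
theorem callee_frames_of {Hc : Heap} {frames' : List (Nat × FrameLayout)} {e s : State} {top : Nat} {mem : Mem} {ws : List Span}
    (hpre : HeapPre T H rest frames e) (hb : Hc.base = H.base) (hl : Hc.limit = H.limit)
    (hinv : HeapInv Hc rest frames' top mem) (hs : Mem.SameExcept ws mem s.mem) (hw : ∀ w, w ∈ ws → w.hi ≤ 0x800000)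
    (hsp : (s.reg .rsp).toNat + 8 ≤ top) (h8 : (s.reg .rsp).toNat % 8 = 0) (hlo' : 0x700000 ≤ (s.reg .rsp).toNat + 8) :
    HeapPre T Hc rest frames' s := by
  have hbase : Hc.base = 0x800000 := hb.trans hpre.base
  have hun : ShadowUntouched mem s.mem := by
    apply untouched_of_sameExcept hs
    intro w hin
    have hw' := hw w hin
    omega
  have hinv' : HeapInv Hc rest frames' ((s.reg .rsp).toNat + 8) s.mem := by
    refine (hinv.sameExcept hun hs ?_).lower hsp (by omega) hlo'
    intro w hin
    have hw' := hw w hin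
    rw [hbase]
    left
    left
    exact hw'
  exact ⟨hinv', hbase, hl.trans hpre.limit, hpre.text, hpre.offText⟩

/-- **`HeapPre` AT THE ENTRY OF A CALLEE, ONE WINDOW** `[lo, hi)` with `hi ≤ 800000H` (the function's stack from its lowest push up
to its highest own local written since `mem`): `callee_frames_of` for the footprint a `u_same` produces most often. -/
theorem callee_window_of {Hc : Heap} {frames' : List (Nat × FrameLayout)} {e s : State} {top lo hi : Nat} {mem : Mem}
    (hpre : HeapPre T H rest frames e) (hb : Hc.base = H.base) (hl : Hc.limit = H.limit)
    (hinv : HeapInv Hc rest frames' top mem) (hs : Mem.SameExcept [⟨lo, hi⟩] mem s.mem) (hhi : hi ≤ 0x800000)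
    (hsp : (s.reg .rsp).toNat + 8 ≤ top) (h8 : (s.reg .rsp).toNat % 8 = 0) (hlo' : 0x700000 ≤ (s.reg .rsp).toNat + 8) :
    HeapPre T Hc rest frames' s := by
  refine callee_frames_of hpre hb hl hinv hs ?_ hsp h8 hlo'
  intro w hin
  have hw_eq := List.mem_singleton.mp hin
  rw [hw_eq]
  exact hhi

end HeapPre

/-- `HeapPre` for the heap of a post at the place of the heap of the pre (`Heap.SameRegion`), at a state with the invariant. -/
theorem _root_.Asan.Heap.SameRegion.heapPre {T : Text} {H H' : Heap} {rest : List Obj} {frames : List (Nat × FrameLayout)}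
    {u v : State} (hs : Heap.SameRegion H H') (h : HeapPre T H rest frames u)
    (hinv : HeapInv H' rest frames ((v.reg .rsp).toNat + 8) v.mem) : HeapPre T H' rest frames v :=
  h.of_inv hinv hs.1 hs.2

end ProgX.Spec
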